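-- pv_equiv track=rewrite | github.com/yeonk-dev/Python | 1주차미션5번.py | find_string
-- ===== SOURCE A (Python) =====
-- def find_string(inputs):
--     res = ""
--     for letter in inputs:
--         if letter.isnumeric():
--             res += ' '
--         else:
--             res += letter
--     res = res.split()
--     return res
-- ===== SOURCE B (Python) =====
-- def find_string(inputs):
--     res = []
--     token = ""
--     for c in inputs:
--         if c.isnumeric() or c.isspace():
--             if token:
--                 res.append(token)
--                 token = ""
--         else:
--             token += c
--     if token:
--         res.append(token)
--     return res
-- ===== Notes on version B (the rewrite author's own statement) =====
-- stated objective: alternative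
-- what changed: Single-pass tokenizer grouping non-(digit/space) runs directly into tokens, replacing A's build-a-substituted-copy-then-str.split two-phase strategy; it trades the intermediate string for an explicit token buffer.
import Mathlib
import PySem

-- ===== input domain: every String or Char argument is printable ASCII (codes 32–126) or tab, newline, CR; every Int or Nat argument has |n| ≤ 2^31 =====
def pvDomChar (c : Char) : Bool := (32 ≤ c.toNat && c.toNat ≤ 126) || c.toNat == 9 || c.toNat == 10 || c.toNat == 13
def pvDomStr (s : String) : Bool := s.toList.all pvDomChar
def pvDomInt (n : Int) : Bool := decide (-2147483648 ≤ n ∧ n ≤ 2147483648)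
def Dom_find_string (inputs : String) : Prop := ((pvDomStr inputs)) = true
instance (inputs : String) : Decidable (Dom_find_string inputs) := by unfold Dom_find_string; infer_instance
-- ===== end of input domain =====

-- B replaces A's "copy the string with digits turned into spaces, then str.split()" by a
-- single-pass tokenizer that groups non-separator runs directly (objective: alternative decomposition).

-- ===== PORT A =====
-- letter.isnumeric() ported as PySem.Chars.isdigit: exact on the ASCII domain (isnumeric = isdigit there).
def find_string (inputs : String) : List String :=
  let res : List Char :=
    inputs.toList.foldl (fun acc c => acc ++ [if PySem.Chars.isdigit c then ' ' else c]) []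
  (PySem.Chars.split₀ res).map String.ofList

-- ===== PORT B =====
-- c.isnumeric() ported as PySem.Chars.isdigit (exact on the ASCII domain); c.isspace() is PySem.Chars.isspace.
def find_string_tok : List Char → List Char → List (List Char) → List (List Char)
  | [], token, res => if token.isEmpty then res else res ++ [token]
  | c :: rest, token, res =>
    if PySem.Chars.isdigit c || PySem.Chars.isspace c then
      if token.isEmpty then find_string_tok rest [] res
      else find_string_tok rest [] (res ++ [token])
    else find_string_tok rest (token ++ [c]) res

def find_string_alt (inputs : String) : List String :=
  (find_string_tok inputs.toList [] []).map String.ofList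

-- ===== PRECONDITION & SPEC =====
def Spec_find_string (inputs : String) (out : List String) : Prop := out = find_string_alt inputs
instance (inputs : String) (out : List String) : Decidable (Spec_find_string inputs out) := by unfold Spec_find_string; infer_instance

-- ===== CLAIM (what is proved, stated in full; the proofs are below) =====
def Claim_equal_find_string : Prop := ∀ (inputs : String), Dom_find_string inputs → Spec_find_string inputs (find_string inputs)

-- ===== LEMMAS AND PROOFS =====

-- the substitution A applies to each character
def pvSub (c : Char) : Char := if PySem.Chars.isdigit c then ' ' else c

lemma pvSub_isspace (c : Char) :
    PySem.Chars.isspace (pvSub c) = (PySem.Chars.isdigit c || PySem.Chars.isspace c) := by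
  unfold pvSub
  by_cases h : PySem.Chars.isdigit c = true
  · simp [h]
    decide
  · simp [h]

-- split₀'s worker on the substituted string computes exactly B's tokenizer
lemma split₀_go_eq_tok (cs cur : List Char) (acc : List (List Char)) :
    PySem.Chars.split₀.go (cs.map pvSub) cur acc
      = find_string_tok cs cur.reverse acc.reverse := by
  induction cs generalizing cur acc with
  | nil =>
    simp [PySem.Chars.split₀.go, find_string_tok]
  | cons c rest ih =>
    simp only [List.map_cons, PySem.Chars.split₀.go, find_string_tok, pvSub_isspace]
    by_cases hsep : (PySem.Chars.isdigit c || PySem.Chars.isspace c) = true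
    · rw [hsep]
      by_cases hcur : cur = []
      · subst hcur
        simp [ih]
      · have h1 : cur.isEmpty = false := by simp [hcur]
        have h2 : cur.reverse.isEmpty = false := by simp [hcur]
        simp only [h1, h2, if_false, Bool.false_eq_true, ih]
        simp
    · rw [Bool.eq_false_iff.mpr hsep]
      simp only [if_false, Bool.false_eq_true]
      have : PySem.Chars.isdigit c = false := by
        rcases Bool.or_eq_false_iff.mp (Bool.eq_false_iff.mpr hsep) with ⟨h, _⟩
        exact h
      have hsub : pvSub c = c := by simp [pvSub, this]
      rw [hsub, ih]
      simp

-- ===== VERDICT (by name: the statement is the Claim_ definition above) =====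
theorem find_string_spec : Claim_equal_find_string := by
  intro inputs _
  unfold Spec_find_string find_string find_string_alt
  have hmap :
      inputs.toList.foldl (fun acc c => acc ++ [if PySem.Chars.isdigit c then ' ' else c]) []
        = inputs.toList.map pvSub := by
    simpa [pvSub] using
      PySem.List.foldl_append_singleton_eq_map
        (fun c => if PySem.Chars.isdigit c then ' ' else c) inputs.toList []
  simp only [hmap]
  show (PySem.Chars.split₀ (inputs.toList.map pvSub)).map String.ofList = _
  rw [show PySem.Chars.split₀ (inputs.toList.map pvSub)
        = PySem.Chars.split₀.go (inputs.toList.map pvSub) [] [] from rfl]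
  rw [split₀_go_eq_tok inputs.toList [] []]
  simp
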